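-- pv_equiv track=rewrite | github.com/SnoozingPinata/ProjectEuler | problem4_LargestPalindromeProduct.py | generate_solutions_list
-- ===== SOURCE A (Python) =====
-- def generate_solutions_list(palindrome_list, first_number, second_number):
--     solution_list = []
--     for palindrome in palindrome_list:
--         for num in range(first_number, 0, -1):
--             if palindrome % num == 0:
--                 if palindrome / num < second_number:
--                     solution_list.append(palindrome)
--     return solution_list
-- ===== SOURCE B (Python) =====
-- def _qualifying_divisor_count(palindrome, first_number, second_number):
--     # number of num in [1, first_number] with num | palindrome and palindrome/num < second_number
--     if first_number <= 0:
--         return 0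
--     if palindrome == 0:
--         return first_number if second_number > 0 else 0
--     n = abs(palindrome)
--     count = 0
--     i = 1
--     while i * i <= n:
--         if n % i == 0:
--             j = n // i
--             if i <= first_number and palindrome // i < second_number:
--                 count += 1
--             if j != i and j <= first_number and palindrome // j < second_number:
--                 count += 1
--         i += 1
--     return count
--
--
-- def generate_solutions_list(palindrome_list, first_number, second_number):
--     result = []
--     for palindrome in palindrome_list:
--         result.extend([palindrome] * _qualifying_divisor_count(palindrome, first_number, second_number))
--     return result
-- ===== Notes on version B (the rewrite author's own statement) =====
-- stated objective: faster
-- what changed: Instead of scanning every num in range(first_number, 0, -1) for each palindrome, B counts the qualifying divisors by trial division up to sqrt(|palindrome|) (checking each divisor pair i, n//i) and appends the palindrome that many times.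
import Mathlib
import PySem

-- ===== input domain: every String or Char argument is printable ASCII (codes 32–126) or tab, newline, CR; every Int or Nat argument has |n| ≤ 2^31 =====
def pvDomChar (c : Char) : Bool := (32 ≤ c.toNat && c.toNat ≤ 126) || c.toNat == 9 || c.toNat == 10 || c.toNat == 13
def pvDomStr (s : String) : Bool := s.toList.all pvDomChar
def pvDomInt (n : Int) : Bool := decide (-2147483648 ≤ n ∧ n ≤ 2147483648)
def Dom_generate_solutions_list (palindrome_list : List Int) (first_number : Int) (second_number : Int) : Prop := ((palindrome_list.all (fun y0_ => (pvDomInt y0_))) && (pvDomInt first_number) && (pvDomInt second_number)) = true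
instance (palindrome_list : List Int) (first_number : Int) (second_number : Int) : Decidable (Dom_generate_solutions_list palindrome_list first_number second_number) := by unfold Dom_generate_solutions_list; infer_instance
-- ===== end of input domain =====

-- B replaces A's per-palindrome scan over all of range(first_number, 0, -1) by trial division up to
-- sqrt(|palindrome|), counting qualifying divisors in pairs (objective: faster, asymptotic).


-- ===== PORT A =====
-- Python's `palindrome / num` is float division, but it is only compared when
-- `palindrome % num == 0`, so the quotient is an exact integer (|palindrome| ≤ 2^31 < 2^53 on Dom)
-- and equals floor division; it is ported as PySem.Int.floordiv, exact on Dom.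
def generate_solutions_list (palindrome_list : List Int) (first_number : Int) (second_number : Int) : List Int :=
  palindrome_list.foldl (fun solution_list palindrome =>
    (PySem.List.pyRange first_number 0 (-1)).foldl (fun acc num =>
      if PySem.Int.mod palindrome num == 0 then
        if PySem.Int.floordiv palindrome num < second_number then acc ++ [palindrome] else acc
      else acc) solution_list) []

-- ===== PORT B =====
-- while i * i <= n: trial division; counts the divisor pair (i, n / i).
def pvCountLoop (p f s : Int) (n i : Nat) (count : Int) : Int :=
  if _h : i * i ≤ n then
    if n % i == 0 then
      let j := n / i
      let c1 := if (i : Int) ≤ f ∧ PySem.Int.floordiv p (i : Int) < s then count + 1 else count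
      let c2 := if j ≠ i ∧ (j : Int) ≤ f ∧ PySem.Int.floordiv p (j : Int) < s then c1 + 1 else c1
      pvCountLoop p f s n (i + 1) c2
    else pvCountLoop p f s n (i + 1) count
  else count
termination_by n + 1 - i * i
decreasing_by
  all_goals
    have h2 : i * i < (i + 1) * (i + 1) := by nlinarith
    omega

def pvQualCount (p f s : Int) : Int :=
  if f ≤ 0 then 0
  else if p = 0 then (if 0 < s then f else 0)
  else pvCountLoop p f s p.natAbs 1 0

def generate_solutions_list_alt (palindrome_list : List Int) (first_number : Int) (second_number : Int) : List Int :=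
  palindrome_list.foldl (fun result palindrome =>
    result ++ List.replicate (pvQualCount palindrome first_number second_number).toNat palindrome) []

-- ===== PRECONDITION & SPEC =====
def Spec_generate_solutions_list (palindrome_list : List Int) (first_number : Int) (second_number : Int) (out : List Int) : Prop := out = generate_solutions_list_alt palindrome_list first_number second_number
instance (palindrome_list : List Int) (first_number : Int) (second_number : Int) (out : List Int) : Decidable (Spec_generate_solutions_list palindrome_list first_number second_number out) := by unfold Spec_generate_solutions_list; infer_instance

-- ===== CLAIM (what is proved, stated in full; the proofs are below) =====
def Claim_equal_generate_solutions_list : Prop := ∀ (palindrome_list : List Int) (first_number : Int) (second_number : Int), Dom_generate_solutions_list palindrome_list first_number second_number → Spec_generate_solutions_list palindrome_list first_number second_number (generate_solutions_list palindrome_list first_number second_number)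

-- ===== LEMMAS AND PROOFS =====

-- The number of qualifying divisors, as a Finset cardinality (the common yardstick).
def pvKA (p f s : Int) : Nat :=
  ((Finset.Icc 1 f.toNat).filter (fun d : Nat => (d : Int) ∣ p ∧ p < s * (d : Int))).card

-- the set still to be counted by pvCountLoop from index i on
def pvSetB (p f s : Int) (n i : Nat) : Finset Nat :=
  n.divisors.filter (fun d : Nat => ((d : Int) ≤ f ∧ p < s * (d : Int)) ∧ i ≤ min d (n / d))

theorem pvFoldA (p s : Int) (l : List Int) (acc : List Int) :
    l.foldl (fun acc num =>
      if PySem.Int.mod p num == 0 then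
        if PySem.Int.floordiv p num < s then acc ++ [p] else acc
      else acc) acc
    = acc ++ List.replicate
        (l.countP (fun num => (PySem.Int.mod p num == 0) && decide (PySem.Int.floordiv p num < s))) p := by
  induction l generalizing acc with
  | nil => simp
  | cons x xs ih =>
    simp only [List.foldl_cons, List.countP_cons, ih]
    by_cases h1 : PySem.Int.mod p x = 0 <;> by_cases h2 : PySem.Int.floordiv p x < s <;>
      simp [h1, h2, List.replicate_succ]

theorem pvCountQ (p s : Int) (k : Nat) (hk : 0 < k) :
    ((PySem.Int.mod p (k : Int) == 0) && decide (PySem.Int.floordiv p (k : Int) < s)) = true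
      ↔ ((k : Int) ∣ p ∧ p < s * (k : Int)) := by
  have hk0 : (0:Int) < (k : Int) := Int.natCast_pos.mpr hk
  simp [PySem.Int.mod_eq_zero_iff_dvd, PySem.Int.floordiv_lt_iff_lt_mul hk0]

theorem pvCountRange (p s : Int) (m : Nat) :
    (PySem.List.pyRange (m : Int) 0 (-1)).countP
        (fun num => (PySem.Int.mod p num == 0) && decide (PySem.Int.floordiv p num < s))
    = ((Finset.Icc 1 m).filter (fun d : Nat => (d : Int) ∣ p ∧ p < s * (d : Int))).card := by
  induction m with
  | zero => simp [PySem.List.pyRange_neg_one_eq_nil (by norm_num : (0:Int) ≤ 0)]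
  | succ m ih =>
    rw [PySem.List.pyRange_neg_one_cons (Int.natCast_pos.mpr (Nat.succ_pos m)),
      show ((m + 1 : Nat) : Int) - 1 = (m : Int) by push_cast; ring,
      List.countP_cons, ih,
      ← Finset.insert_Icc_right_eq_Icc_add_one (by omega : 1 ≤ m + 1),
      Finset.filter_insert]
    have hnotmem : m + 1 ∉ (Finset.Icc 1 m).filter
        (fun d : Nat => (d : Int) ∣ p ∧ p < s * (d : Int)) := by
      intro hmem
      rw [Finset.mem_filter, Finset.mem_Icc] at hmem
      omega
    by_cases hc : (((m + 1 : Nat) : Int) ∣ p ∧ p < s * ((m + 1 : Nat) : Int))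
    · rw [if_pos hc, Finset.card_insert_of_notMem hnotmem,
        if_pos ((pvCountQ p s (m + 1) (Nat.succ_pos m)).mpr hc)]
    · rw [if_neg hc, if_neg (fun hq => hc ((pvCountQ p s (m + 1) (Nat.succ_pos m)).mp hq))]
      omega

theorem pvCountZ (p f s : Int) :
    (PySem.List.pyRange f 0 (-1)).countP
        (fun num => (PySem.Int.mod p num == 0) && decide (PySem.Int.floordiv p num < s))
    = pvKA p f s := by
  by_cases hf : f ≤ 0
  · rw [PySem.List.pyRange_neg_one_eq_nil hf]
    have : f.toNat = 0 := by omega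
    simp [pvKA, this]
  · have : f = (f.toNat : Int) := by omega
    rw [pvKA, this, pvCountRange, Int.toNat_natCast]

theorem pvSetB_empty (p f s : Int) (n i : Nat) (_hi : 1 ≤ i) (h : ¬ i * i ≤ n) :
    pvSetB p f s n i = ∅ := by
  rw [Finset.eq_empty_iff_forall_notMem]
  intro d hd
  simp only [pvSetB, Finset.mem_filter, Nat.mem_divisors] at hd
  obtain ⟨⟨hdvd, hn0⟩, _, hmin⟩ := hd
  have hkey : d * (n / d) = n := Nat.mul_div_cancel' hdvd
  have : i * i ≤ d * (n / d) := Nat.mul_le_mul (by omega) (by omega)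
  omega

theorem pvStep_nodvd (p f s : Int) (n i : Nat) (_hi : 1 ≤ i) (hnd : ¬ n % i = 0) :
    pvSetB p f s n i = pvSetB p f s n (i + 1) := by
  ext d
  simp only [pvSetB, Finset.mem_filter, Nat.mem_divisors]
  constructor
  · rintro ⟨⟨hdvd, hn0⟩, hQ, hmin⟩
    refine ⟨⟨hdvd, hn0⟩, hQ, ?_⟩
    rcases Nat.eq_or_lt_of_le hmin with heq | hlt
    · exfalso
      have : d = i ∨ n / d = i := by omega
      rcases this with rfl | hnd2
      · exact hnd (Nat.eq_zero_of_dvd_of_lt hdvd |> fun _ => by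
          exact absurd (Nat.mod_eq_zero_of_dvd hdvd) hnd)
      · exact hnd (Nat.mod_eq_zero_of_dvd (hnd2 ▸ Nat.div_dvd_of_dvd hdvd))
    · omega
  · rintro ⟨⟨hdvd, hn0⟩, hQ, hmin⟩
    exact ⟨⟨hdvd, hn0⟩, hQ, by omega⟩

theorem pvStep_dvd (p f s : Int) (n i j : Nat) (hj : j = n / i)
    (hi : 1 ≤ i) (h : i * i ≤ n) (hdvd : i ∣ n) :
    ((pvSetB p f s n i).card : Int)
      = (if (i : Int) ≤ f ∧ p < s * (i : Int) then (1:Int) else 0)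
        + (if j ≠ i ∧ (j : Int) ≤ f ∧ p < s * (j : Int) then (1:Int) else 0)
        + (pvSetB p f s n (i + 1)).card := by
  have hn0 : n ≠ 0 := by nlinarith
  have hij : i ≤ j := hj ▸ (Nat.le_div_iff_mul_le (by omega)).mpr h
  have hjd : j ∣ n := hj ▸ Nat.div_dvd_of_dvd hdvd
  have hji : n / j = i := hj ▸ Nat.div_div_self hdvd hn0
  have hsplit : pvSetB p f s n i
      = (({i, j} : Finset Nat).filter (fun d : Nat => (d : Int) ≤ f ∧ p < s * (d : Int)))
        ∪ pvSetB p f s n (i + 1) := by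
    ext d
    simp only [pvSetB, Finset.mem_union, Finset.mem_filter, Nat.mem_divisors,
      Finset.mem_insert, Finset.mem_singleton]
    constructor
    · rintro ⟨⟨hdvd', hn0'⟩, hQ, hmin⟩
      rcases Nat.eq_or_lt_of_le hmin with heq | hlt
      · left
        refine ⟨?_, hQ⟩
        have : d = i ∨ n / d = i := by omega
        rcases this with rfl | hnd2
        · exact Or.inl rfl
        · right
          rw [hj, ← hnd2]
          exact (Nat.div_div_self hdvd' hn0').symm
      · right; exact ⟨⟨hdvd', hn0'⟩, hQ, by omega⟩
    · rintro (⟨hd, hQ⟩ | ⟨hm, hQ, hmin⟩)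
      · rcases hd with rfl | rfl
        · exact ⟨⟨hdvd, hn0⟩, hQ, by omega⟩
        · refine ⟨⟨hjd, hn0⟩, hQ, by omega⟩
      · exact ⟨hm, hQ, by omega⟩
  have hdisj : Disjoint
      (({i, j} : Finset Nat).filter (fun d : Nat => (d : Int) ≤ f ∧ p < s * (d : Int)))
      (pvSetB p f s n (i + 1)) := by
    rw [Finset.disjoint_left]
    intro d hd hd'
    simp only [Finset.mem_filter, Finset.mem_insert, Finset.mem_singleton] at hd
    simp only [pvSetB, Finset.mem_filter, Nat.mem_divisors] at hd'
    obtain ⟨hd12, _⟩ := hd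
    obtain ⟨_, _, hmin⟩ := hd'
    rcases hd12 with rfl | rfl <;> omega
  rw [hsplit, Finset.card_union_of_disjoint hdisj]
  have hcard : ((({i, j} : Finset Nat).filter
      (fun d : Nat => (d : Int) ≤ f ∧ p < s * (d : Int))).card : Int)
      = (if (i : Int) ≤ f ∧ p < s * (i : Int) then (1:Int) else 0)
        + (if j ≠ i ∧ (j : Int) ≤ f ∧ p < s * (j : Int) then (1:Int) else 0) := by
    by_cases hji' : j = i
    · subst hji'
      have hset : ({j, j} : Finset Nat) = {j} := by simp
      rw [hset, Finset.filter_singleton]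
      by_cases h1 : (j : Int) ≤ f ∧ p < s * (j : Int) <;> simp [h1]
    · have hnotmem : i ∉ ({j} : Finset Nat) := by simp [Ne.symm hji']
      rw [show ({i, j} : Finset Nat) = insert i {j} from rfl,
        Finset.filter_insert, Finset.filter_singleton]
      by_cases h1 : (i : Int) ≤ f ∧ p < s * (i : Int) <;>
        by_cases h2 : (j : Int) ≤ f ∧ p < s * (j : Int) <;>
          simp [h1, h2, hji', Finset.card_insert_of_notMem, hnotmem]
  rw [Nat.cast_add, hcard]

theorem pvLoopInv (p f s : Int) (n i : Nat) (c : Int) :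
    1 ≤ i → pvCountLoop p f s n i c = c + (pvSetB p f s n i).card := by
  induction i, c using pvCountLoop.induct p f s n with
  | case1 i c h hd j c1 c2 ih =>
    intro hi
    have hi0 : (0:Int) < (i : Int) := Int.natCast_pos.mpr (by omega)
    have hdvd : i ∣ n := Nat.dvd_of_mod_eq_zero (by simpa using hd)
    have hn0 : n ≠ 0 := by nlinarith
    have hj1 : 0 < n / i := Nat.div_pos (Nat.le_of_dvd (by omega) hdvd) (by omega)
    have hj0 : (0:Int) < _ := Int.natCast_pos.mpr hj1
    replace ih := ih (by omega)
    have hstep := pvStep_dvd p f s n i (n / i) rfl hi h hdvd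
    rw [pvCountLoop]
    simp only [j, c1, c2, dite_eq_ite, PySem.Int.floordiv_lt_iff_lt_mul hi0,
      PySem.Int.floordiv_lt_iff_lt_mul hj0] at ih
    simp only [dif_pos h, if_pos hd, PySem.Int.floordiv_lt_iff_lt_mul hi0,
      PySem.Int.floordiv_lt_iff_lt_mul hj0]
    rw [ih, hstep]
    split_ifs <;> ring
  | case2 i c h hd ih =>
    intro hi
    rw [pvCountLoop]
    simp only [dif_pos h, if_neg hd]
    rw [ih (by omega), pvStep_nodvd p f s n i hi (by simpa using hd)]
  | case3 i c h =>
    intro hi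
    rw [pvCountLoop]
    simp only [dif_neg h]
    rw [pvSetB_empty p f s n i hi h]
    simp

theorem pvCountEq (p f s : Int) : pvKA p f s = (pvQualCount p f s).toNat := by
  unfold pvQualCount
  split_ifs with hf hp hs
  · have h0 : f.toNat = 0 := by omega
    simp [pvKA, h0]
  · subst hp
    rw [pvKA, Finset.filter_true_of_mem, Nat.card_Icc]
    · omega
    · intro d hd
      rw [Finset.mem_Icc] at hd
      exact ⟨dvd_zero _, by
        have : (0:Int) < (d : Int) := Int.natCast_pos.mpr (by omega)
        nlinarith⟩
  · subst hp
    rw [pvKA, Finset.filter_false_of_mem, Finset.card_empty]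
    · omega
    · intro d hd
      rw [Finset.mem_Icc] at hd
      rintro ⟨-, hlt⟩
      have hd0 : (0:Int) < (d : Int) := Int.natCast_pos.mpr (by omega)
      nlinarith
  · have hn0 : p.natAbs ≠ 0 := by
      intro h0
      exact hp (Int.natAbs_eq_zero.mp h0)
    rw [pvLoopInv p f s p.natAbs 1 0 le_rfl, zero_add, Int.toNat_natCast, pvKA]
    congr 1
    ext d
    simp only [pvSetB, Finset.mem_filter, Finset.mem_Icc, Nat.mem_divisors]
    constructor
    · rintro ⟨⟨hd1, hd2⟩, hdvd, hlt⟩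
      have hdn : d ∣ p.natAbs := Int.natAbs_dvd_natAbs.mpr (by simpa using hdvd)
      have hq : 0 < p.natAbs / d :=
        Nat.div_pos (Nat.le_of_dvd (by omega) hdn) (by omega)
      exact ⟨⟨hdn, hn0⟩, ⟨by omega, hlt⟩, by omega⟩
    · rintro ⟨⟨hdn, -⟩, ⟨hdf, hlt⟩, hmin⟩
      have hd1 : 1 ≤ d := by omega
      have hdvd : (d : Int) ∣ p := Int.natAbs_dvd_natAbs.mp (by simpa using hdn)
      exact ⟨⟨hd1, by omega⟩, hdvd, hlt⟩

theorem pvBody (p f s : Int) (acc : List Int) :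
    (PySem.List.pyRange f 0 (-1)).foldl (fun acc num =>
      if PySem.Int.mod p num == 0 then
        if PySem.Int.floordiv p num < s then acc ++ [p] else acc
      else acc) acc
    = acc ++ List.replicate (pvQualCount p f s).toNat p := by
  rw [pvFoldA, pvCountZ, pvCountEq]

-- ===== VERDICT (by name: the statement is the Claim_ definition above) =====
theorem generate_solutions_list_spec : Claim_equal_generate_solutions_list := by
  intro pl f s _
  unfold Spec_generate_solutions_list generate_solutions_list generate_solutions_list_alt
  simp only [pvBody]
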